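-- pv_equiv track=rewrite | github.com/alexeydrygin/CodeWars | Python/6_Checkered_Board/main.py | checkered_board
-- ===== SOURCE A (Python) =====
-- def checkered_board(n):
--     dark = '\u25A0'
--     light = '\u25A1'
--     board = ''
--     for i in range(n):
--         for j in range(n):
--             if (i+j) % 2 == 0:
--                 board += dark
--             else:
--                 board += light
--             if j != n-1:
--                 board += ' '
--         if i != n-1:
--             board += '\n'
--     if n % 2 == 0:
--         board = board.replace(dark, 'temp').replace(
--             light, dark).replace('temp', light)
--     return board
-- ===== SOURCE B (Python) =====
-- def checkered_board(n):
--     dark = '\u25A0'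
--     light = '\u25A1'
--     first, second = (light, dark) if n % 2 == 0 else (dark, light)
--     strip = (first + ' ' + second + ' ') * n
--     even_row = strip[:2 * n - 1]
--     odd_row = strip[2:2 * n + 1]
--     return '\n'.join(even_row if i % 2 == 0 else odd_row for i in range(n))
-- ===== Notes on version B (the rewrite author's own statement) =====
-- stated objective: faster
-- what changed: Replaces the per-cell nested loop with character-by-character string accumulation and the even-n triple str.replace inversion by a template-and-slice construction: one repeated alternating strip string is built, the two distinct row strings are cut out of it by slicing, and the board is n alternating references to those two rows joined by newlines.
import Mathlib
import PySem

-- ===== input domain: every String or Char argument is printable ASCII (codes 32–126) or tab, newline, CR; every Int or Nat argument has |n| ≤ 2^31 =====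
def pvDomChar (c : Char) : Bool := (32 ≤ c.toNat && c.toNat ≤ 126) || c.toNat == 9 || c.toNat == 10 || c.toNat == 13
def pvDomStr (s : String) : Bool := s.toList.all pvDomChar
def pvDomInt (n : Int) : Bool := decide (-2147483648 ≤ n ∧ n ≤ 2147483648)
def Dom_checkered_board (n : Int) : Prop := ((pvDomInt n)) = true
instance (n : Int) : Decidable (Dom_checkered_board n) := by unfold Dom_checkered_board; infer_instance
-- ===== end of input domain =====

-- B replaces A's per-cell nested accumulation and even-n triple str.replace inversion
-- by a template-and-slice construction: slice the two row strings out of one repeated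
-- alternating strip and join n alternating copies of them (objective: alternative).

-- ===== PORT A =====
-- A builds the board character by character over nested ranges, then for even n
-- inverts the colours by three whole-string replace passes via the marker "temp".
def checkered_board (n : Int) : String :=
  let dark : List Char := ['■']
  let light : List Char := ['□']
  let board : List Char :=
    (PySem.List.pyRange 0 n 1).foldl (fun board i =>
      let board :=
        (PySem.List.pyRange 0 n 1).foldl (fun board j =>
          let board := board ++ (if PySem.Int.mod (i + j) 2 = 0 then dark else light)
          if j ≠ n - 1 then board ++ [' '] else board) board
      if i ≠ n - 1 then board ++ ['\n'] else board) []
  let board :=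
    if PySem.Int.mod n 2 = 0 then
      PySem.Chars.replace
        (PySem.Chars.replace (PySem.Chars.replace board dark ['t','e','m','p']) light dark)
        ['t','e','m','p'] light
    else board
  String.mk board

-- ===== PORT B =====
-- B: first/second colour from n's parity, one repeated strip "f s f s …",
-- the two row kinds sliced out of it, n alternating rows joined by newlines.
def checkered_board_alt (n : Int) : String :=
  let dark : List Char := ['■']
  let light : List Char := ['□']
  let fs : List Char × List Char :=
    if PySem.Int.mod n 2 = 0 then (light, dark) else (dark, light)
  let strip : List Char := PySem.List.pyRepeat (fs.1 ++ [' '] ++ fs.2 ++ [' ']) n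
  let evenRow : List Char := PySem.List.slice strip none (some (2 * n - 1))
  let oddRow : List Char := PySem.List.slice strip (some 2) (some (2 * n + 1))
  String.mk (PySem.Chars.join ['\n']
    ((PySem.List.pyRange 0 n 1).map (fun i =>
      if PySem.Int.mod i 2 = 0 then evenRow else oddRow)))

-- ===== PRECONDITION & SPEC =====
def Spec_checkered_board (n : Int) (out : String) : Prop := out = checkered_board_alt n
instance (n : Int) (out : String) : Decidable (Spec_checkered_board n out) := by unfold Spec_checkered_board; infer_instance

-- ===== CLAIM (what is proved, stated in full; the proofs are below) =====
def Claim_equal_checkered_board : Prop := ∀ (n : Int), Dom_checkered_board n → Spec_checkered_board n (checkered_board n)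

-- ===== LEMMAS AND PROOFS =====

-- the common normal form both ports are reduced to: row i, cell j holds f
-- when (i+j) is even, s otherwise; cells joined by ' ', rows by '\n'
def pvRowFS (n : Int) (f s : Char) (i : Int) : List Char :=
  PySem.Chars.join [' ']
    ((PySem.List.pyRange 0 n 1).map (fun j =>
      [if PySem.Int.mod (i + j) 2 = 0 then f else s]))

def pvBoardFS (n : Int) (f s : Char) : List Char :=
  PySem.Chars.join ['\n'] ((PySem.List.pyRange 0 n 1).map (pvRowFS n f s))

-- ---- A side ----

def pvSw : Char → Char := fun c => if c = '■' then '□' else if c = '□' then '■' else c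

def pvCell (i j : Int) : List Char :=
  if PySem.Int.mod (i + j) 2 = 0 then ['■'] else ['□']

def pvRow (n i : Int) : List Char :=
  PySem.Chars.join [' '] ((PySem.List.pyRange 0 n 1).map (pvCell i))

def pvBoard (n : Int) : List Char :=
  PySem.Chars.join ['\n'] ((PySem.List.pyRange 0 n 1).map (pvRow n))

def pvF1 : Char → List Char := fun x => if x = '■' then ['t','e','m','p'] else [x]
def pvF2 : Char → List Char :=
  fun x => if x = '■' then ['t','e','m','p'] else if x = '□' then ['■'] else [x]

lemma pv_flatMap_pure {α : Type} (l : List α) : l.flatMap (fun x => [x]) = l := by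
  induction l with
  | nil => rfl
  | cons a t ih => simp [List.flatMap_cons, ih]

lemma pv_flatMap_map {α β : Type} (f : α → β) (l : List α) :
    l.flatMap (fun x => [f x]) = l.map f := by
  induction l with
  | nil => rfl
  | cons a t ih => simp [List.flatMap_cons, ih]

-- a fold over range(a, n) that appends f i and a separator except after i = n-1
-- builds acc ++ sep.join(map f)
lemma pv_fold_join (g : List Char → Int → List Char) (f : Int → List Char)
    (sep : List Char) (n : Int)
    (hg : ∀ b i, g b i = if i ≠ n - 1 then b ++ f i ++ sep else b ++ f i) :
    ∀ (k : Nat) (a : Int), (n - a).toNat ≤ k → ∀ acc,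
      (PySem.List.pyRange a n 1).foldl g acc
        = acc ++ PySem.Chars.join sep ((PySem.List.pyRange a n 1).map f) := by
  intro k
  induction k with
  | zero =>
    intro a hk acc
    have h : n ≤ a := by omega
    rw [PySem.List.pyRange_one_eq_nil h]
    simp [PySem.Chars.join_nil]
  | succ k ih =>
    intro a hk acc
    by_cases h : n ≤ a
    · rw [PySem.List.pyRange_one_eq_nil h]
      simp [PySem.Chars.join_nil]
    · push_neg at h
      rw [PySem.List.pyRange_one_cons h]
      by_cases hlast : a = n - 1
      · have h2 : n ≤ a + 1 := by omega
        rw [PySem.List.pyRange_one_eq_nil h2]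
        simp only [List.foldl_cons, List.foldl_nil, List.map_cons, List.map_nil,
          PySem.Chars.join_singleton]
        rw [hg]
        simp [hlast]
      · have h2 : a + 1 < n := by omega
        have happ := ih (a + 1) (by omega) (g acc a)
        rw [List.foldl_cons, happ]
        rw [PySem.List.pyRange_one_cons h2]
        simp only [List.map_cons]
        rw [PySem.Chars.join_cons_cons, hg]
        simp [hlast]

lemma pv_inner (n i : Int) (acc : List Char) :
    (PySem.List.pyRange 0 n 1).foldl (fun board j =>
        let board := board ++ (if PySem.Int.mod (i + j) 2 = 0 then ['■'] else ['□'])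
        if j ≠ n - 1 then board ++ [' '] else board) acc
      = acc ++ pvRow n i := by
  exact pv_fold_join _ (pvCell i) [' '] n
    (fun b j => by simp only [pvCell])
    (n - 0).toNat 0 le_rfl acc

lemma pv_outer (n : Int) :
    (PySem.List.pyRange 0 n 1).foldl (fun board i =>
        let board :=
          (PySem.List.pyRange 0 n 1).foldl (fun board j =>
            let board := board ++ (if PySem.Int.mod (i + j) 2 = 0 then ['■'] else ['□'])
            if j ≠ n - 1 then board ++ [' '] else board) board
        if i ≠ n - 1 then board ++ ['\n'] else board) []
      = pvBoard n := by
  have := pv_fold_join (fun board i =>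
      let board :=
        (PySem.List.pyRange 0 n 1).foldl (fun board j =>
          let board := board ++ (if PySem.Int.mod (i + j) 2 = 0 then ['■'] else ['□'])
          if j ≠ n - 1 then board ++ [' '] else board) board
      if i ≠ n - 1 then board ++ ['\n'] else board) (pvRow n) ['\n'] n
    (fun b i => by simp only [pv_inner])
    (n - 0).toNat 0 le_rfl []
  simpa [pvBoard] using this

-- replace.go walks past a block containing no occurrence of the pattern head
lemma pv_go_skip (oh : Char) (ot new : List Char) :
    ∀ (cs : List Char), oh ∉ cs → ∀ (fuel : Nat), cs.length ≤ fuel → ∀ (rest acc : List Char),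
      PySem.Chars.replace.go (oh :: ot) new fuel (cs ++ rest) acc
        = PySem.Chars.replace.go (oh :: ot) new (fuel - cs.length) rest (cs.reverse ++ acc) := by
  intro cs
  induction cs with
  | nil => intro _ fuel _ rest acc; simp
  | cons c t ih =>
    intro hmem fuel hf rest acc
    have hc : oh ≠ c := fun h => hmem (h ▸ List.mem_cons_self)
    obtain ⟨fuel', rfl⟩ : ∃ m, fuel = m + 1 :=
      ⟨fuel - 1, by simp only [List.length_cons] at hf; omega⟩
    have hpre : (oh :: ot).isPrefixOf (c :: (t ++ rest)) = false := by
      simp [List.isPrefixOf, hc]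
    rw [List.cons_append, PySem.Chars.replace.go.eq_def]
    simp only [hpre, Bool.false_eq_true, if_false]
    rw [ih (fun h => hmem (List.mem_cons_of_mem _ h)) fuel'
      (by simp only [List.length_cons] at hf; omega) rest (c :: acc)]
    simp [List.reverse_cons, List.append_assoc]

-- replace on a string assembled from blocks: each block is either exactly the
-- pattern (replaced) or free of the pattern's first character (kept)
lemma pv_go_flatMap (oh : Char) (ot new : List Char) (g out : Char → List Char) :
    ∀ (l : List Char),
      (∀ x ∈ l, (g x = oh :: ot ∧ out x = new) ∨ (oh ∉ g x ∧ out x = g x)) →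
      ∀ (fuel : Nat), (l.flatMap g).length ≤ fuel → ∀ (acc : List Char),
        PySem.Chars.replace.go (oh :: ot) new fuel (l.flatMap g) acc
          = acc.reverse ++ l.flatMap out := by
  intro l
  induction l with
  | nil =>
    intro _ fuel _ acc
    rw [List.flatMap_nil, List.flatMap_nil]
    cases fuel with
    | zero => rw [PySem.Chars.replace.go.eq_def]
    | succ f => rw [PySem.Chars.replace.go.eq_def]; simp
  | cons x t ih =>
    intro h fuel hf acc
    have ht : ∀ y ∈ t, (g y = oh :: ot ∧ out y = new) ∨ (oh ∉ g y ∧ out y = g y) :=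
      fun y hy => h y (List.mem_cons_of_mem _ hy)
    rcases h x List.mem_cons_self with ⟨hgx, houtx⟩ | ⟨hA, houtx⟩
    · rw [List.flatMap_cons, hgx] at hf ⊢
      rw [List.length_append, List.length_cons] at hf
      obtain ⟨fuel', rfl⟩ : ∃ m, fuel = m + 1 := ⟨fuel - 1, by omega⟩
      have hpre : (oh :: ot).isPrefixOf (oh :: (ot ++ t.flatMap g)) = true := by
        rw [List.isPrefixOf_iff_prefix, ← List.cons_append]
        exact List.prefix_append _ _
      rw [List.cons_append, PySem.Chars.replace.go.eq_def]
      simp only [hpre, if_true]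
      rw [show List.drop (oh :: ot).length (oh :: (ot ++ t.flatMap g)) = t.flatMap g by
        simp]
      rw [ih ht fuel' (by omega) (new.reverse ++ acc)]
      simp [List.flatMap_cons, houtx, List.append_assoc]
    · rw [List.flatMap_cons] at hf ⊢
      rw [List.length_append] at hf
      rw [pv_go_skip oh ot new (g x) hA fuel (by omega) (t.flatMap g) acc]
      rw [ih ht (fuel - (g x).length) (by omega) ((g x).reverse ++ acc)]
      simp [List.flatMap_cons, houtx, List.append_assoc]

lemma pv_replace_flatMap (oh : Char) (ot new : List Char) (g out : Char → List Char)
    (l : List Char)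
    (h : ∀ x ∈ l, (g x = oh :: ot ∧ out x = new) ∨ (oh ∉ g x ∧ out x = g x)) :
    PySem.Chars.replace (l.flatMap g) (oh :: ot) new = l.flatMap out := by
  rw [PySem.Chars.replace]
  simp only [List.isEmpty_cons, Bool.false_eq_true, if_false]
  simpa using pv_go_flatMap oh ot new g out l h (l.flatMap g).length le_rfl []

lemma pv_join_mem (P : Char → Prop) (sep : List Char) (hsep : ∀ c ∈ sep, P c) :
    ∀ (parts : List (List Char)), (∀ p ∈ parts, ∀ c ∈ p, P c) →
      ∀ c ∈ PySem.Chars.join sep parts, P c := by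
  intro parts
  induction parts with
  | nil => intro _ c hc; rw [PySem.Chars.join_nil] at hc; cases hc
  | cons p rest ih =>
    intro hp c hc
    cases rest with
    | nil =>
      rw [PySem.Chars.join_singleton] at hc
      exact hp p List.mem_cons_self c hc
    | cons q r =>
      rw [PySem.Chars.join_cons_cons] at hc
      rcases List.mem_append.mp hc with hc | hc
      · rcases List.mem_append.mp hc with hc | hc
        · exact hp p List.mem_cons_self c hc
        · exact hsep c hc
      · exact ih (fun p' hp' => hp p' (List.mem_cons_of_mem _ hp')) c hc

lemma pv_map_join (f : Char → Char) (sep : List Char) :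
    ∀ (parts : List (List Char)),
      List.map f (PySem.Chars.join sep parts)
        = PySem.Chars.join (sep.map f) (parts.map (List.map f)) := by
  intro parts
  induction parts with
  | nil => simp [PySem.Chars.join_nil]
  | cons p rest ih =>
    cases rest with
    | nil => simp [PySem.Chars.join_singleton]
    | cons q r =>
      simp only [List.map_cons] at ih ⊢
      rw [PySem.Chars.join_cons_cons, PySem.Chars.join_cons_cons]
      simp [ih]

lemma pv_board_mem (n : Int) :
    ∀ c ∈ pvBoard n, c = '■' ∨ c = '□' ∨ c = ' ' ∨ c = '\n' := by
  unfold pvBoard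
  refine pv_join_mem (fun c => c = '■' ∨ c = '□' ∨ c = ' ' ∨ c = '\n') ['\n']
    (by intro c hc; simp at hc; subst hc; tauto) _ ?_
  intro p hp
  simp only [List.mem_map] at hp
  obtain ⟨i, _, rfl⟩ := hp
  unfold pvRow
  refine pv_join_mem (fun c => c = '■' ∨ c = '□' ∨ c = ' ' ∨ c = '\n') [' ']
    (by intro c hc; simp at hc; subst hc; tauto) _ ?_
  intro q hq
  simp only [List.mem_map] at hq
  obtain ⟨j, _, rfl⟩ := hq
  intro c hc
  simp only [pvCell] at hc
  split at hc <;> simp at hc <;> subst hc <;> tauto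

-- the replace chain turns the board into its per-character colour swap
lemma pv_replace_chain (n : Int) :
    PySem.Chars.replace
        (PySem.Chars.replace (PySem.Chars.replace (pvBoard n) ['■'] ['t','e','m','p'])
          ['□'] ['■'])
        ['t','e','m','p'] ['□']
      = (pvBoard n).map pvSw := by
  have hmem := pv_board_mem n
  have h1 : PySem.Chars.replace (pvBoard n) ['■'] ['t','e','m','p']
      = (pvBoard n).flatMap pvF1 := by
    conv_lhs => rw [← pv_flatMap_pure (pvBoard n)]
    apply pv_replace_flatMap
    intro x hx
    rcases hmem x hx with rfl | rfl | rfl | rfl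
    · left; exact ⟨rfl, by simp [pvF1]⟩
    · right; exact ⟨by decide, by simp [pvF1]⟩
    · right; exact ⟨by decide, by simp [pvF1]⟩
    · right; exact ⟨by decide, by simp [pvF1]⟩
  have h2 : PySem.Chars.replace ((pvBoard n).flatMap pvF1) ['□'] ['■']
      = (pvBoard n).flatMap pvF2 := by
    apply pv_replace_flatMap
    intro x hx
    rcases hmem x hx with rfl | rfl | rfl | rfl
    · right; exact ⟨by decide, by simp [pvF1, pvF2]⟩
    · left; exact ⟨by simp [pvF1], by simp [pvF2]⟩
    · right; exact ⟨by decide, by simp [pvF1, pvF2]⟩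
    · right; exact ⟨by decide, by simp [pvF1, pvF2]⟩
  have h3 : PySem.Chars.replace ((pvBoard n).flatMap pvF2) ['t','e','m','p'] ['□']
      = (pvBoard n).flatMap (fun x => [pvSw x]) := by
    apply pv_replace_flatMap
    intro x hx
    rcases hmem x hx with rfl | rfl | rfl | rfl
    · left; exact ⟨by simp [pvF2], by simp [pvSw]⟩
    · right; exact ⟨by decide, by simp [pvF2, pvSw]⟩
    · right; exact ⟨by decide, by simp [pvF2, pvSw]⟩
    · right; exact ⟨by decide, by simp [pvF2, pvSw]⟩
  rw [h1, h2, h3, pv_flatMap_map]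

-- A's value in the common normal form, with the first colour fixed by n's parity
lemma pv_A (n : Int) :
    checkered_board n
      = String.mk (pvBoardFS n
          (if PySem.Int.mod n 2 = 0 then '□' else '■')
          (if PySem.Int.mod n 2 = 0 then '■' else '□')) := by
  unfold checkered_board
  simp only []
  rw [pv_outer n]
  by_cases hmod : PySem.Int.mod n 2 = 0
  · rw [if_pos hmod, if_pos hmod, if_pos hmod]
    apply congrArg String.mk
    rw [pv_replace_chain n]
    unfold pvBoard pvBoardFS
    rw [pv_map_join]
    simp only [List.map_map, List.map_cons, List.map_nil]
    have hsep : pvSw '\n' = '\n' := by decide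
    rw [hsep]
    congr 1
    apply List.map_congr_left
    intro i _
    simp only [Function.comp]
    unfold pvRow pvRowFS
    rw [pv_map_join]
    simp only [List.map_map, List.map_cons, List.map_nil]
    have hsep2 : pvSw ' ' = ' ' := by decide
    rw [hsep2]
    congr 1
    apply List.map_congr_left
    intro j _
    simp only [Function.comp]
    unfold pvCell
    rcases PySem.Int.mod_two_eq (i + j) with h | h <;> rw [h] <;> decide
  · rw [if_neg hmod, if_neg hmod, if_neg hmod]
    apply congrArg String.mk
    unfold pvBoard pvBoardFS
    congr 1
    apply List.map_congr_left
    intro i _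
    unfold pvRow pvRowFS
    congr 1
    apply List.map_congr_left
    intro j _
    unfold pvCell
    rcases PySem.Int.mod_two_eq (i + j) with h | h <;> rw [h] <;> decide

-- ---- B side ----

-- cell colour by Nat parity, and the flat "cell space cell space …" strip
def pvCs (f s : Char) (j : Nat) : Char := if j % 2 = 0 then f else s

def pvPairs (cs : Nat → Char) (K : Nat) : List Char :=
  (List.range K).flatMap (fun j => [cs j, ' '])

lemma pv_strip (f s : Char) (m : Nat) :
    (List.replicate m [f, ' ', s, ' ']).flatten = pvPairs (pvCs f s) (2 * m) := by
  induction m with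
  | zero => rfl
  | succ m ih =>
    rw [List.replicate_succ', List.flatten_append, ih]
    unfold pvPairs
    rw [show 2 * (m + 1) = (2 * m + 1) + 1 by omega, List.range_succ, List.range_succ,
      List.flatMap_append, List.flatMap_append]
    have h1 : pvCs f s (2 * m) = f := by unfold pvCs; rw [if_pos (by omega)]
    have h2 : pvCs f s (2 * m + 1) = s := by unfold pvCs; rw [if_neg (by omega)]
    simp [h1, h2]

lemma pv_pairs_len (cs : Nat → Char) (K : Nat) : (pvPairs cs K).length = 2 * K := by
  unfold pvPairs
  induction K with
  | zero => rfl
  | succ K ih => rw [List.range_succ, List.flatMap_append]; simp_all; omega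

-- the strip of k cells minus its trailing space is the cells joined by spaces
lemma pv_J (cs : Nat → Char) :
    ∀ (l : List Nat), l ≠ [] →
      l.flatMap (fun j => [cs j, ' '])
        = PySem.Chars.join [' '] (l.map (fun j => [cs j])) ++ [' '] := by
  intro l
  induction l with
  | nil => intro h; exact absurd rfl h
  | cons x t ih =>
    intro _
    cases t with
    | nil => simp [PySem.Chars.join_singleton]
    | cons y r =>
      rw [List.flatMap_cons, ih (by simp)]
      simp only [List.map_cons]
      rw [PySem.Chars.join_cons_cons]
      simp

lemma pv_take (cs : Nat → Char) (k K : Nat) (h1 : 1 ≤ k) (h2 : k ≤ K) :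
    List.take (2 * k - 1) (pvPairs cs K)
      = PySem.Chars.join [' '] ((List.range k).map (fun j => [cs j])) := by
  have hK : List.range K = List.range k ++ (List.range (K - k)).map (fun x => k + x) := by
    rw [← List.range_add]
    congr 1
    omega
  have hsplit : pvPairs cs K
      = pvPairs cs k ++ ((List.range (K - k)).map (fun x => k + x)).flatMap (fun j => [cs j, ' ']) := by
    unfold pvPairs
    rw [hK, List.flatMap_append]
  rw [hsplit, List.take_append, pv_pairs_len,
    show 2 * k - 1 - 2 * k = 0 by omega, List.take_zero, List.append_nil]
  have hne : List.range k ≠ [] := by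
    simp [List.range_eq_nil]; omega
  unfold pvPairs
  rw [pv_J cs (List.range k) hne, List.take_append]
  have hlen : (PySem.Chars.join [' '] ((List.range k).map (fun j => [cs j]))).length = 2 * k - 1 := by
    have := pv_pairs_len cs k
    unfold pvPairs at this
    rw [pv_J cs (List.range k) hne] at this
    simp at this
    omega
  rw [hlen, Nat.sub_self, List.take_zero, List.append_nil, ← hlen, List.take_length]

-- dropping the first cell-and-space shifts every cell index by one
lemma pv_drop (cs : Nat → Char) (K : Nat) (hK : 1 ≤ K) :
    List.drop 2 (pvPairs cs K) = pvPairs (fun j => cs (j + 1)) (K - 1) := by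
  unfold pvPairs
  rw [show K = (K - 1) + 1 by omega, List.range_succ_eq_map, List.flatMap_cons,
    List.flatMap_map]
  simp [Nat.succ_eq_add_one]

-- B's two sliced rows, expanded at a given row parity, are the normal-form row
lemma pv_B_row (m : Nat) (hm : 1 ≤ m) (f s : Char) (i : Int) :
    (if PySem.Int.mod i 2 = 0 then
        PySem.List.slice ((List.replicate m [f, ' ', s, ' ']).flatten) none (some (2 * (m : Int) - 1))
      else
        PySem.List.slice ((List.replicate m [f, ' ', s, ' ']).flatten) (some 2) (some (2 * (m : Int) + 1)))
      = pvRowFS (m : Int) f s i := by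
  have hrow : pvRowFS (m : Int) f s i
      = PySem.Chars.join [' ']
          ((List.range m).map (fun (j : Nat) => [if PySem.Int.mod (i + (j : Int)) 2 = 0 then f else s])) := by
    unfold pvRowFS
    rw [PySem.List.pyRange_zero_natCast, List.map_map]
    rfl
  rcases PySem.Int.mod_two_eq i with hi | hi
  · rw [if_pos hi, PySem.List.slice_to _ (by omega : (0:Int) ≤ 2 * (m : Int) - 1),
      show ((2 * (m : Int) - 1)).toNat = 2 * m - 1 by omega,
      pv_strip, pv_take (pvCs f s) m (2 * m) hm (by omega), hrow]
    congr 1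
    apply List.map_congr_left
    intro j _
    have hi' : i % 2 = 0 := by
      rwa [PySem.Int.mod_eq_emod_of_pos (by norm_num)] at hi
    have hcond : (PySem.Int.mod (i + (j : Int)) 2 = 0) ↔ (j % 2 = 0) := by
      rw [PySem.Int.mod_eq_emod_of_pos (by norm_num)]
      omega
    unfold pvCs
    simp only [hcond]
  · rw [if_neg (by rw [hi]; norm_num),
      PySem.List.slice_toNat _ (by norm_num : (0:Int) ≤ 2) (by omega : (0:Int) ≤ 2 * (m : Int) + 1),
      show ((2:Int)).toNat = 2 by rfl,
      show ((2 * (m : Int) + 1)).toNat = 2 * m + 1 by omega,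
      show 2 * m + 1 - 2 = 2 * m - 1 by omega,
      pv_strip, pv_drop (pvCs f s) (2 * m) (by omega),
      pv_take _ m (2 * m - 1) hm (by omega), hrow]
    congr 1
    apply List.map_congr_left
    intro j _
    have hi' : i % 2 = 1 := by
      rwa [PySem.Int.mod_eq_emod_of_pos (by norm_num)] at hi
    have hcond : (PySem.Int.mod (i + (j : Int)) 2 = 0) ↔ ((j + 1) % 2 = 0) := by
      rw [PySem.Int.mod_eq_emod_of_pos (by norm_num)]
      omega
    unfold pvCs
    simp only [hcond]

-- B's value in the common normal form
lemma pv_B (n : Int) :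
    checkered_board_alt n
      = String.mk (pvBoardFS n
          (if PySem.Int.mod n 2 = 0 then '□' else '■')
          (if PySem.Int.mod n 2 = 0 then '■' else '□')) := by
  by_cases hn : n ≤ 0
  · unfold checkered_board_alt pvBoardFS
    rw [PySem.List.pyRange_one_eq_nil hn]
    simp [PySem.Chars.join_nil]
  · push_neg at hn
    obtain ⟨m, rfl⟩ : ∃ m : Nat, n = (m : Int) := ⟨n.toNat, by omega⟩
    have hm : 1 ≤ m := by omega
    unfold checkered_board_alt pvBoardFS
    simp only [PySem.List.pyRepeat, Int.toNat_natCast]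
    apply congrArg String.mk
    by_cases hmod : PySem.Int.mod (m : Int) 2 = 0
    · rw [if_pos hmod, if_pos hmod, if_pos hmod]
      congr 1
      apply List.map_congr_left
      intro i _
      exact pv_B_row m hm '□' '■' i
    · rw [if_neg hmod, if_neg hmod, if_neg hmod]
      congr 1
      apply List.map_congr_left
      intro i _
      exact pv_B_row m hm '■' '□' i

-- ===== VERDICT (by name: the statement is the Claim_ definition above) =====
theorem checkered_board_spec : Claim_equal_checkered_board := by
  intro n _
  unfold Spec_checkered_board
  rw [pv_A, pv_B]
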